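-- pv_equiv track=rewrite | github.com/Fish8558/Courece-4 | src/hh_api.py | correct_query
-- ===== SOURCE A (Python) =====
-- def correct_query(user_params: dict) -> dict:
--     """
--     Метод обработки полученных от пользователя данных для обращения к API
--     :param user_params: словарь с параметрами полученный от пользователя
--     :return: откорректированный словарь параметров для запроса к API
--     """
--     experience_dict = {
--         range(0, 1): {'id': 'noExperience', 'name': "без опыта"},
--         range(1, 3): {'id': 'between1And3', 'name': "от 1 до 3 лет"},
--         range(3, 6): {'id': 'between3And6', 'name': "от 3 до 6 лет"},
--         range(6, 30): {'id': 'moreThan6', 'name': "более 6 лет"}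
--     }
--
--     experience = user_params['experience']
--     if experience.isdigit():
--         for key in experience_dict.keys():
--             if int(experience) in key:
--                 user_params['experience'] = experience_dict[key]['id']
--     else:
--         del user_params['experience']
--
--     return user_params
-- ===== SOURCE B (Python) =====
-- def correct_query(user_params: dict) -> dict:
--     experience = user_params['experience']
--     if experience.isdigit():
--         n = int(experience)
--         if n < 30:
--             labels = ('noExperience', 'between1And3', 'between3And6', 'moreThan6')
--             user_params['experience'] = labels[(n >= 1) + (n >= 3) + (n >= 6)]
--     else:
--         del user_params['experience']
--     return user_params
-- ===== Notes on version B (the rewrite author's own statement) =====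
-- stated objective: alternative
-- what changed: Replaces the range-keyed dict and the membership-scan loop with arithmetic indexing: it counts how many of the thresholds 1,3,6 the value has crossed and uses that count as an index into a tuple of ids (no table of ranges, no scan, no branch per bucket).
import Mathlib
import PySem

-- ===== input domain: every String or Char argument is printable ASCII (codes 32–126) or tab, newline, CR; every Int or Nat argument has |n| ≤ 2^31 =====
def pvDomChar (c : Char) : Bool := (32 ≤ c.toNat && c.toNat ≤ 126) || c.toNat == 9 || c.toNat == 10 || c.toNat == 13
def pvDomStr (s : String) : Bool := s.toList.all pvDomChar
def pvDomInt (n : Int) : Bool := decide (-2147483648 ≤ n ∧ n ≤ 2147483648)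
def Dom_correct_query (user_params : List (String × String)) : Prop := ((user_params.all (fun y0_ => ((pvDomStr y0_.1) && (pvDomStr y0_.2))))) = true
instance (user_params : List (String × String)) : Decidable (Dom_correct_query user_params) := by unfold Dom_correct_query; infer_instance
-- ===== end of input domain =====

-- B replaces A's range-keyed dict and key-scan loop with arithmetic indexing (count of thresholds crossed) into a label list; both mutate the caller's dict in Python — the equivalence proved is about the returned dict.


-- ===== PORT A =====
-- A's experience_dict as a list of (range-start, range-stop, id); the 'name' fields are never read.
def correct_query (user_params : List (String × String)) : List (String × String) :=
  let d := PySem.Dict.mk user_params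
  match d.get? "experience" with
  | none => user_params  -- Python raises KeyError here; excluded by Pre_
  | some experience =>
    if PySem.Str.strIsdigit experience then
      -- for key in experience_dict.keys(): if int(experience) in key: user_params['experience'] = experience_dict[key]['id']
      -- (int() cannot fail after isdigit on the ASCII domain; getD 0 is never used)
      (([((0:Int), (1:Int), "noExperience"), (1, 3, "between1And3"),
         (3, 6, "between3And6"), (6, 30, "moreThan6")].foldl
        (fun acc kv =>
          if kv.1 ≤ (PySem.Int.ofStr? experience).getD 0 ∧ (PySem.Int.ofStr? experience).getD 0 < kv.2.1
          then acc.insert "experience" kv.2.2 else acc) d)).items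
    else (d.erase "experience").items

-- ===== PORT B =====
def correct_query_alt (user_params : List (String × String)) : List (String × String) :=
  let d := PySem.Dict.mk user_params
  match d.get? "experience" with
  | none => user_params  -- Python raises KeyError here; excluded by Pre_
  | some experience =>
    if PySem.Str.strIsdigit experience then
      let n := (PySem.Int.ofStr? experience).getD 0  -- int() cannot fail after isdigit on the ASCII domain
      if n < 30 then
        -- labels[(n >= 1) + (n >= 3) + (n >= 6)]
        let labels := ["noExperience", "between1And3", "between3And6", "moreThan6"]
        let idx : Int := (if 1 ≤ n then 1 else 0) + (if 3 ≤ n then 1 else 0) + (if 6 ≤ n then 1 else 0)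
        (d.insert "experience" ((PySem.List.pyGet? labels idx).getD "")).items  -- index is always in range; getD never used
      else d.items
    else (d.erase "experience").items

-- ===== PRECONDITION & SPEC =====
-- A raises KeyError when the key "experience" is absent; exactly those inputs are excluded.
def Pre_correct_query (user_params : List (String × String)) : Prop :=
  "experience" ∈ user_params.map Prod.fst
instance (user_params : List (String × String)) : Decidable (Pre_correct_query user_params) := by unfold Pre_correct_query; infer_instance
def pvWitness_correct_query : (List (String × String)) := [("experience", "2"), ("text", "python")]
def Spec_correct_query (user_params : List (String × String)) (out : List (String × String)) : Prop := out = correct_query_alt user_params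
instance (user_params : List (String × String)) (out : List (String × String)) : Decidable (Spec_correct_query user_params out) := by unfold Spec_correct_query; infer_instance

-- ===== CLAIM (what is proved, stated in full; the proofs are below) =====
def Claim_equal_correct_query : Prop := ∀ (user_params : List (String × String)), Dom_correct_query user_params → Pre_correct_query user_params → Spec_correct_query user_params (correct_query user_params)

-- ===== LEMMAS AND PROOFS =====

-- a non-empty all-digit string parses to a non-negative integer
lemma pv_aux (o : Option Nat) :
    0 ≤ (Option.map (fun n : Int => n) (o.bind fun a => some ((a : Int)))).getD 0 := by
  cases o <;> simp

lemma ofChars_digits_nonneg (s : List Char) (h : PySem.Chars.strIsdigit s = true) :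
    0 ≤ (PySem.Int.ofChars? s).getD 0 := by
  obtain ⟨hne, hall⟩ : ¬s = [] ∧ ∀ c ∈ s, PySem.Chars.isdigit c = true := by
    simpa [PySem.Chars.strIsdigit, List.all_eq_true] using h
  have hnospace : ∀ c ∈ s, PySem.Int.isIntSpace c = false := by
    intro c hc
    have hd := hall c hc
    simp only [PySem.Chars.isdigit, Bool.and_eq_true, decide_eq_true_eq] at hd
    simp only [PySem.Int.isIntSpace, Bool.or_eq_false_iff, decide_eq_false_iff_not]
    and_intros <;> (intro he; subst he; exact absurd hd (by decide))
  have hdw1 : s.dropWhile PySem.Int.isIntSpace = s := by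
    rw [List.dropWhile_eq_self_iff]
    intro hl
    simp [hnospace _ (List.getElem_mem hl)]
  have hdw2 : s.reverse.dropWhile PySem.Int.isIntSpace = s.reverse := by
    rw [List.dropWhile_eq_self_iff]
    intro hl
    have hm : s.reverse[0] ∈ s := by
      exact List.mem_reverse.mp (List.getElem_mem hl)
    rw [Bool.not_eq_true]
    exact hnospace _ hm
  unfold PySem.Int.ofChars?
  rw [hdw1, hdw2, List.reverse_reverse]
  dsimp only
  split
  · rename_i ds heq
    exact absurd (hall '-' (by simp)) (by decide)
  · rename_i ds heq
    exact absurd (hall '+' (by simp)) (by decide)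
  · exact pv_aux _

-- ===== VERDICT (by name: the statement is the Claim_ definition above) =====
theorem correct_query_spec : Claim_equal_correct_query := by
  intro ps _ hpre
  unfold Spec_correct_query correct_query correct_query_alt
  have hkeys : (PySem.Dict.mk ps).keys = ps.map Prod.fst := rfl
  cases hget : (PySem.Dict.mk ps).get? "experience" with
  | none =>
    exfalso
    have := (PySem.Dict.get?_eq_none_iff_not_mem_keys (d := PySem.Dict.mk ps) (k := "experience")).mp hget
    rw [hkeys] at this
    exact this hpre
  | some e =>
    simp only
    by_cases hd : PySem.Str.strIsdigit e
    · have hn : 0 ≤ (PySem.Int.ofStr? e).getD 0 := by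
        have := ofChars_digits_nonneg e.toList (by simpa [PySem.Str.strIsdigit] using hd)
        simpa [PySem.Int.ofStr?] using this
      simp only [hget, hd, List.foldl, if_true, ite_true]
      split_ifs <;>
        first
          | (exfalso; omega)
          | simp [PySem.List.pyGet?, PySem.List.pyIdx?]
    · simp only [hget, hd]
      simp
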